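-- pv_equiv track=rewrite | github.com/1688168/Codes | LC/[2518] Number of Great Partitions - by contribution.py | countPartitions
-- ===== SOURCE A (Python) =====
-- from typing import List
--
-- def countPartitions(nums: List[int], k: int) -> int:
--     """
--     * nums[ii]: an array of resources
--     * when partition to two groups  (A, B), this is equivalent to each item is choose or skip,
--       picked in Group A, skipped (automatically) in Group B
--     * whenever you pick/skip something and count ways/optimize profit/cost -> DP
--     * whenever you have a big anser space and need MOD -> think of DP
--     * whenever you have two partition groups -> consider they are symmentric
--     * whenever you have two partitions, think of ttl = A + B
--     """
--     N=len(nums)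
--     M=int(1e9)+7
--
--     if sum(nums) < 2*k: return 0
--
--     nums=[0]+nums # have (N+1) in size
--
--     dp = [[0]*k for _ in range(N+1)] # N resources (0~N-1). sum to 0~(k-1)
--     dp[0][0]=1
--
--     for ii in range(N): #from 1~N (after dummy insertion)
--         for jj in range(k):  #sum from 0~(k-1)
--             dp[ii+1][jj] = (dp[ii+1][jj]+ dp[ii][jj])%M
--             if jj >= nums[ii+1]:
--                 dp[ii+1][jj] = (dp[ii+1][jj] + dp[ii][jj-nums[ii+1]])%M
--
--     ttl = pow(2, N)%M
--     invalid = sum(dp[-1])%M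
--
--     return (ttl-invalid*2%M)%M
-- ===== SOURCE B (Python) =====
-- from typing import List
--
-- def countPartitions(nums: List[int], k: int) -> int:
--     M = 10**9 + 7
--     if sum(nums) < 2 * k:
--         return 0
--
--     def mul(a, b):
--         # truncated product of two coefficient lists (degrees < k), mod M
--         return [sum(a[i] * b[t - i] for i in range(max(0, t - len(b) + 1), min(len(a), t + 1))) % M
--                 for t in range(min(k, len(a) + len(b) - 1))]
--
--     def pair_up(ps):
--         out = []
--         t = 0
--         while t + 1 < len(ps):
--             out.append(mul(ps[t], ps[t + 1]))
--             t += 2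
--         if t < len(ps):
--             out.append(ps[t])
--         return out
--
--     # one factor (1 + z^x) per item, truncated below degree k
--     polys = [[1] + [0] * (x - 1) + [1] if 0 < x < k else ([2] if x == 0 else [1]) for x in nums]
--     while len(polys) > 1:
--         polys = pair_up(polys)
--     invalid = sum(polys[0]) % M
--     return (pow(2, len(nums)) - 2 * invalid) % M
-- ===== Notes on version B (the rewrite author's own statement) =====
-- stated objective: alternative
-- what changed: Replaces A's row-by-row (N+1) x k DP table with a divide-and-conquer tournament that multiplies the generating polynomials (1 + z^x) pairwise via truncated convolutions (coefficients below k, mod M) and sums the final coefficient list.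
import Mathlib
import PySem

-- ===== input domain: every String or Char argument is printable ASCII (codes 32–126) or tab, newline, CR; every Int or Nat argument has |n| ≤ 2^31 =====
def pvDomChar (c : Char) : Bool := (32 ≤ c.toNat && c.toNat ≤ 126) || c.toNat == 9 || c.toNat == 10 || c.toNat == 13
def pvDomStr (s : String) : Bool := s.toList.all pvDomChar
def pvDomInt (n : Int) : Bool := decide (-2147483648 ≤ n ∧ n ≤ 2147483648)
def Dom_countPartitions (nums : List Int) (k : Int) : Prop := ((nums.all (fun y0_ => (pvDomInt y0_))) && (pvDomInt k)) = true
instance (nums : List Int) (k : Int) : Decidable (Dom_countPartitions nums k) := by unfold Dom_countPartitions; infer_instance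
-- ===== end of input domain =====

-- B replaces A's row-by-row (N+1)×k DP table by a tournament of pairwise truncated
-- convolutions of the factor polynomials (1 + z^x) (objective: alternative algorithm;
-- same return value on all inputs where A returns).

-- ===== PORT A =====
-- dp[i][j] read / dp[i][j] = v (Python 2-D list indexing; exact inside Pre_, where every
-- index used by A is in range — Python would raise IndexError exactly where Pre_ fails)
def pvGet2 (dp : List (List Int)) (i j : Int) : Int :=
  PySem.List.pyGetD (PySem.List.pyGetD dp i []) j 0

def pvSet2 (dp : List (List Int)) (i j : Int) (v : Int) : List (List Int) :=
  PySem.List.pySetD dp i (PySem.List.pySetD (PySem.List.pyGetD dp i []) j v)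

-- body of A's inner `for jj in range(k)` loop (ii is the outer index, nums2 = [0] + nums)
def pvInnerBody (nums2 : List Int) (k ii : Int) (dp : List (List Int)) (jj : Int) :
    List (List Int) :=
  let x := PySem.List.pyGetD nums2 (ii + 1) 0
  let dp' := pvSet2 dp (ii + 1) jj
      (PySem.Int.mod (pvGet2 dp (ii + 1) jj + pvGet2 dp ii jj) 1000000007)
  if x ≤ jj then
    pvSet2 dp' (ii + 1) jj
      (PySem.Int.mod (pvGet2 dp' (ii + 1) jj + pvGet2 dp' ii (jj - x)) 1000000007)
  else dp'

-- body of A's outer `for ii in range(N)` loop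
def pvOuterBody (nums2 : List Int) (k : Int) (dp : List (List Int)) (ii : Int) :
    List (List Int) :=
  (PySem.List.pyRange 0 k 1).foldl (pvInnerBody nums2 k ii) dp

def countPartitions (nums : List Int) (k : Int) : Int :=
  let N : Int := nums.length
  let M : Int := 1000000007
  if nums.sum < 2 * k then 0 else
    let nums2 : List Int := 0 :: nums
    let dp0 : List (List Int) :=
      (PySem.List.pyRange 0 (N + 1) 1).map (fun _ => List.replicate k.toNat 0)
    let dp1 := pvSet2 dp0 0 0 1   -- dp[0][0] = 1
    let dp2 := (PySem.List.pyRange 0 N 1).foldl (pvOuterBody nums2 k) dp1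
    let ttl := PySem.Int.mod ((2 : Int) ^ nums.length) M
    let invalid := PySem.Int.mod (PySem.List.pyGetD dp2 (-1) []).sum M
    PySem.Int.mod (ttl - PySem.Int.mod (invalid * 2) M) M

-- ===== PORT B =====
-- B's `mul(a, b)`: truncated product of two coefficient lists (degrees < k), mod M;
-- coefficient t is the comprehension's sum over i in [max(0,t-len(b)+1), min(len(a),t+1))
def pvMul (k : Int) (a b : List Int) : List Int :=
  (PySem.List.pyRange 0 (min k ((a.length : Int) + (b.length : Int) - 1)) 1).map (fun t =>
    PySem.Int.mod
      (((PySem.List.pyRange (max 0 (t - (b.length : Int) + 1))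
          (min (a.length : Int) (t + 1)) 1).map
        (fun i => PySem.List.pyGetD a i 0 * PySem.List.pyGetD b (t - i) 0)).sum)
      1000000007)

-- B's `pair_up(ps)`: combine adjacent pairs, keep a trailing odd element
def pvPairUp (k : Int) : List (List Int) → List (List Int)
  | a :: b :: r => pvMul k a b :: pvPairUp k r
  | l => l

-- termination measure for B's `while len(polys) > 1` loop (cited by pvTour)
theorem pvPairUp_len (k : Int) : ∀ (n : Nat) (l : List (List Int)), l.length ≤ n →
    (pvPairUp k l).length ≤ (l.length + 1) / 2 := by
  intro n
  induction n with
  | zero =>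
    intro l hl
    match l with
    | [] => simp [pvPairUp]
  | succ n ihn =>
    intro l hl
    match l with
    | [] => simp [pvPairUp]
    | [a] => simp [pvPairUp]
    | a :: b :: r =>
      have := ihn r (by simp at hl; omega)
      simp only [pvPairUp, List.length_cons]
      omega

-- B's `while len(polys) > 1: polys = pair_up(polys)`
def pvTour (k : Int) (ps : List (List Int)) : List (List Int) :=
  if h : 1 < ps.length then pvTour k (pvPairUp k ps) else ps
termination_by ps.length
decreasing_by
  have := pvPairUp_len k ps.length ps le_rfl
  omega

def countPartitions_alt (nums : List Int) (k : Int) : Int :=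
  if nums.sum < 2 * k then 0 else
    -- one factor (1 + z^x) per item, truncated below degree k
    let polys := nums.map (fun x =>
      if 0 < x ∧ x < k then 1 :: (List.replicate (x - 1).toNat 0 ++ [1])
      else if x = 0 then [2] else [1])
    let fin := pvTour k polys
    let invalid := PySem.Int.mod (PySem.List.pyGetD fin 0 []).sum 1000000007
    PySem.Int.mod ((2 : Int) ^ nums.length - 2 * invalid) 1000000007

-- ===== PRECONDITION & SPEC =====
-- Pre_ excludes exactly the inputs where A raises IndexError: unless it returns 0 early
-- (sum(nums) < 2*k), A needs k ≥ 1 (else dp[0][0] fails) and all elements nonnegative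
-- (a negative nums value makes dp[ii][jj - nums[ii+1]] index past the end of the row).
def Pre_countPartitions (nums : List Int) (k : Int) : Prop :=
  nums.sum < 2 * k ∨ (1 ≤ k ∧ ∀ x ∈ nums, 0 ≤ x)
instance (nums : List Int) (k : Int) : Decidable (Pre_countPartitions nums k) := by
  unfold Pre_countPartitions; infer_instance

def pvWitness_countPartitions : List Int × Int := ([1, 2, 3], 2)

def Spec_countPartitions (nums : List Int) (k : Int) (out : Int) : Prop := out = countPartitions_alt nums k
instance (nums : List Int) (k : Int) (out : Int) : Decidable (Spec_countPartitions nums k out) := by unfold Spec_countPartitions; infer_instance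

-- ===== CLAIM (what is proved, stated in full; the proofs are below) =====
def Claim_equal_countPartitions : Prop := ∀ (nums : List Int) (k : Int), Dom_countPartitions nums k → Pre_countPartitions nums k → Spec_countPartitions nums k (countPartitions nums k)

-- ===== LEMMAS AND PROOFS =====

-- Int-indexed form of pyGetD_pySetD_natCast
theorem pv_getD_setD {α : Type} (xs : List α) (i m : Int) (v d : α)
    (h0 : 0 ≤ i) (h1 : i < (xs.length : Int)) (h0m : 0 ≤ m) :
    PySem.List.pyGetD (PySem.List.pySetD xs i v) m d =
      if m = i then v else PySem.List.pyGetD xs m d := by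
  have hi : i = ((i.toNat : Nat) : Int) := (Int.toNat_of_nonneg h0).symm
  have hm : m = ((m.toNat : Nat) : Int) := (Int.toNat_of_nonneg h0m).symm
  rw [hi, hm, PySem.List.pyGetD_pySetD_natCast xs i.toNat m.toNat v d (by omega)]
  by_cases hc : m.toNat = i.toNat
  · rw [if_pos hc, if_pos (by exact_mod_cast hc)]
  · rw [if_neg hc, if_neg (by exact_mod_cast hc)]

-- the value A's inner loop stores at position j of row ii+1 (prev = row ii, x = nums[ii])
def tgtRow (prev : List Int) (x : Int) (j : Nat) : Int :=
  if x ≤ (j : Int) then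
    PySem.Int.mod (PySem.Int.mod (0 + prev.getD j 0) 1000000007 +
      prev.getD ((j : Int) - x).toNat 0) 1000000007
  else PySem.Int.mod (0 + prev.getD j 0) 1000000007

-- row/table update helpers (Nat-indexed forms of pv_getD_setD)
theorem getD_pySetD_row (r : List Int) (a : Nat) (v : Int) (j : Nat) (ha : a < r.length) :
    (PySem.List.pySetD r (a : Int) v).getD j 0 = if j = a then v else r.getD j 0 := by
  have h := pv_getD_setD r (a : Int) (j : Int) v 0 (by omega) (by exact_mod_cast ha) (by omega)
  rw [PySem.List.pyGetD_natCast, PySem.List.pyGetD_natCast] at h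
  rw [h]
  by_cases hc : j = a
  · rw [if_pos (by exact_mod_cast hc), if_pos hc]
  · rw [if_neg (by exact_mod_cast hc), if_neg hc]

theorem getD_pySetD_tbl (DP : List (List Int)) (b : Int) (r : List Int) (m : Int)
    (hb0 : 0 ≤ b) (hb : b < (DP.length : Int)) (hm : 0 ≤ m) :
    PySem.List.pyGetD (PySem.List.pySetD DP b r) m [] =
      if m = b then r else PySem.List.pyGetD DP m [] :=
  pv_getD_setD DP b m r [] hb0 hb hm

theorem getD_pySetD_row0 (r : List Int) (v : Int) (j : Nat) (h : 0 < r.length) :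
    (PySem.List.pySetD r 0 v).getD j 0 = if j = 0 then v else r.getD j 0 := by
  have hh := getD_pySetD_row r 0 v j h
  simpa using hh

-- A's inner loop over range(a, k), characterised: it only rewrites row ii+1,
-- position by position, each position j getting tgtRow prev x j
theorem innerA (nums2 : List Int) (k : Int) (i : Nat) (n : Nat) :
    ∀ (a : Nat) (dp : List (List Int)) (prev cur : List Int),
    k.toNat = a + n →
    i + 1 < dp.length →
    PySem.List.pyGetD dp (i : Int) [] = prev →
    PySem.List.pyGetD dp ((i : Int) + 1) [] = cur →
    prev.length = k.toNat → cur.length = k.toNat →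
    0 ≤ PySem.List.pyGetD nums2 ((i : Int) + 1) 0 →
    (∀ j : Nat, a ≤ j → j < k.toNat → cur.getD j 0 = 0) →
    ((((PySem.List.pyRange (a : Int) k 1).foldl (pvInnerBody nums2 k (i : Int)) dp)).length
        = dp.length ∧
     (∀ m : Nat, m < dp.length → m ≠ i + 1 →
        PySem.List.pyGetD ((PySem.List.pyRange (a : Int) k 1).foldl
          (pvInnerBody nums2 k (i : Int)) dp) (m : Int) [] =
          PySem.List.pyGetD dp (m : Int) []) ∧
     (PySem.List.pyGetD ((PySem.List.pyRange (a : Int) k 1).foldl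
        (pvInnerBody nums2 k (i : Int)) dp) ((i : Int) + 1) []).length = k.toNat ∧
     (∀ j : Nat, j < k.toNat →
        (PySem.List.pyGetD ((PySem.List.pyRange (a : Int) k 1).foldl
          (pvInnerBody nums2 k (i : Int)) dp) ((i : Int) + 1) []).getD j 0 =
          if j < a then cur.getD j 0
          else tgtRow prev (PySem.List.pyGetD nums2 ((i : Int) + 1) 0) j)) := by
  induction n with
  | zero =>
    intro a dp prev cur hka hi hprev hcur hplen hclen hx hzero
    rw [PySem.List.pyRange_one_eq_nil (by omega : k ≤ (a : Int))]
    refine ⟨rfl, fun m _ _ => rfl, by rw [List.foldl_nil, hcur, hclen], ?_⟩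
    intro j hj
    rw [List.foldl_nil, hcur, if_pos (by omega : j < a)]
  | succ n ihn =>
    intro a dp prev cur hka hi hprev hcur hplen hclen hx hzero
    have hak : (a : Int) < k := by omega
    have haK : a < k.toNat := by omega
    have hilt : ((i : Int) + 1) < (dp.length : Int) := by exact_mod_cast hi
    have hcur0 : cur.getD a 0 = 0 := hzero a le_rfl haK
    set xv := PySem.List.pyGetD nums2 ((i : Int) + 1) 0 with hxv
    set v1 := PySem.Int.mod (0 + prev.getD a 0) 1000000007 with hv1
    set cur1 := PySem.List.pySetD cur (a : Int) v1 with hc1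
    set dp' := PySem.List.pySetD dp ((i : Int) + 1) cur1 with hdp'
    have hstep1 : pvSet2 dp ((i : Int) + 1) (a : Int)
        (PySem.Int.mod (pvGet2 dp ((i : Int) + 1) (a : Int) +
          pvGet2 dp (i : Int) (a : Int)) 1000000007) = dp' := by
      unfold pvSet2 pvGet2
      rw [hcur, hprev, PySem.List.pyGetD_natCast, PySem.List.pyGetD_natCast, hcur0]
    have hdp'rows : ∀ m : Int, 0 ≤ m →
        PySem.List.pyGetD dp' m [] = if m = (i : Int) + 1 then cur1
          else PySem.List.pyGetD dp m [] := fun m hm =>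
      getD_pySetD_tbl dp _ cur1 m (by omega) hilt hm
    have hdp'len : dp'.length = dp.length := PySem.List.length_pySetD dp _ cur1
    have hc1len : cur1.length = k.toNat := by
      rw [hc1, PySem.List.length_pySetD, hclen]
    have hgdp'cur : pvGet2 dp' ((i : Int) + 1) (a : Int) = v1 := by
      unfold pvGet2
      rw [hdp'rows _ (by omega), if_pos rfl, PySem.List.pyGetD_natCast, hc1,
        getD_pySetD_row cur a v1 a (by omega), if_pos rfl]
    have hgdp'prev : pvGet2 dp' (i : Int) ((a : Int) - xv) =
        PySem.List.pyGetD prev ((a : Int) - xv) 0 := by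
      unfold pvGet2
      rw [hdp'rows _ (by omega), if_neg (by omega), hprev]
    -- the single updated row after processing index a, in both branches
    have hmain : ∀ (curN : List Int),
        curN.length = k.toNat →
        (∀ j : Nat, j < k.toNat →
          curN.getD j 0 = if j = a then tgtRow prev xv a else cur.getD j 0) →
        ∀ (dpN : List (List Int)), dpN = PySem.List.pySetD dp' ((i : Int) + 1) curN ∨
            (dpN = dp' ∧ curN = cur1) →
        ((((PySem.List.pyRange ((a : Int) + 1) k 1).foldl
            (pvInnerBody nums2 k (i : Int)) dpN)).length = dp.length ∧
         (∀ m : Nat, m < dp.length → m ≠ i + 1 →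
            PySem.List.pyGetD ((PySem.List.pyRange ((a : Int) + 1) k 1).foldl
              (pvInnerBody nums2 k (i : Int)) dpN) (m : Int) [] =
              PySem.List.pyGetD dp (m : Int) []) ∧
         (PySem.List.pyGetD ((PySem.List.pyRange ((a : Int) + 1) k 1).foldl
            (pvInnerBody nums2 k (i : Int)) dpN) ((i : Int) + 1) []).length = k.toNat ∧
         (∀ j : Nat, j < k.toNat →
            (PySem.List.pyGetD ((PySem.List.pyRange ((a : Int) + 1) k 1).foldl
              (pvInnerBody nums2 k (i : Int)) dpN) ((i : Int) + 1) []).getD j 0 =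
              if j < a then cur.getD j 0 else tgtRow prev xv j)) := by
      intro curN hNlen hNent dpN hdpN
      have hdpNlen : dpN.length = dp.length := by
        rcases hdpN with rfl | ⟨rfl, _⟩
        · rw [PySem.List.length_pySetD, hdp'len]
        · exact hdp'len
      have hdpNrows : ∀ m : Int, 0 ≤ m →
          PySem.List.pyGetD dpN m [] = if m = (i : Int) + 1 then curN
            else PySem.List.pyGetD dp m [] := by
        intro m hm
        rcases hdpN with rfl | ⟨rfl, rfl⟩
        · rw [getD_pySetD_tbl dp' _ curN m (by omega) (by rw [hdp'len]; exact hilt) hm]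
          by_cases hc : m = (i : Int) + 1
          · rw [if_pos hc, if_pos hc]
          · rw [if_neg hc, if_neg hc, hdp'rows m hm, if_neg hc]
        · exact hdp'rows m hm
      have hcast : ((a : Int) + 1) = (((a + 1 : Nat)) : Int) := by push_cast; ring
      obtain ⟨hL, hRows, hRlen, hRent⟩ :=
        ihn (a + 1) dpN prev curN (by omega) (by omega)
          (by rw [hdpNrows _ (by omega), if_neg (by omega)]; exact hprev)
          (by rw [hdpNrows _ (by omega), if_pos rfl])
          hplen hNlen hx
          (by
            intro j hj hjk
            rw [hNent j hjk, if_neg (by omega)]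
            exact hzero j (by omega) hjk)
      rw [← hcast] at hL hRows hRlen hRent
      refine ⟨by rw [hL, hdpNlen], ?_, hRlen, ?_⟩
      · intro m hm hmne
        rw [hRows m (by omega) hmne, hdpNrows _ (by omega),
          if_neg (by exact_mod_cast (by omega : ¬ (m : Int) = ((i : Int) + 1)))]
      · intro j hj
        rw [hRent j hj]
        by_cases hja : j < a + 1
        · by_cases hje : j = a
          · subst hje
            rw [if_pos hja, if_neg (by omega), hNent j hj, if_pos rfl]
          · rw [if_pos hja, if_pos (by omega), hNent j hj, if_neg hje]
        · rw [if_neg hja, if_neg (by omega)]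
    -- now run one step of the loop
    rw [PySem.List.pyRange_one_cons hak, List.foldl_cons]
    simp only [pvInnerBody]
    rw [hstep1]
    by_cases hxa : xv ≤ (a : Int)
    · rw [if_pos hxa, hgdp'cur, hgdp'prev]
      have hset2 : pvSet2 dp' ((i : Int) + 1) (a : Int)
          (PySem.Int.mod (v1 + PySem.List.pyGetD prev ((a : Int) - xv) 0) 1000000007) =
          PySem.List.pySetD dp' ((i : Int) + 1)
            (PySem.List.pySetD cur1 (a : Int)
              (PySem.Int.mod (v1 + PySem.List.pyGetD prev ((a : Int) - xv) 0) 1000000007)) := by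
        unfold pvSet2
        rw [hdp'rows _ (by omega), if_pos rfl]
      rw [hset2]
      apply hmain _ (by rw [PySem.List.length_pySetD]; exact hc1len) _ _ (Or.inl rfl)
      intro j hj
      rw [getD_pySetD_row cur1 a _ j (by omega)]
      by_cases hje : j = a
      · subst hje
        rw [if_pos rfl, if_pos rfl]
        unfold tgtRow
        rw [if_pos hxa]
        congr 1
        congr 1
        rw [PySem.List.pyGetD_eq_getElem prev 0 (by omega) (by push_cast [hplen]; omega),
          List.getD_eq_getElem prev 0 (by push_cast [hplen] at *; omega)]
      · rw [if_neg hje, if_neg hje, hc1, getD_pySetD_row cur a v1 j (by omega), if_neg hje]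
    · rw [if_neg hxa]
      apply hmain cur1 hc1len _ dp' (Or.inr ⟨rfl, rfl⟩)
      intro j hj
      rw [hc1, getD_pySetD_row cur a v1 j (by omega)]
      by_cases hje : j = a
      · subst hje
        rw [if_pos rfl, if_pos rfl]
        unfold tgtRow
        rw [if_neg hxa]
      · rw [if_neg hje, if_neg hje]

-- ---- the common specification: coefficients of ∏ (1 + X^x) over ℤ ----

noncomputable def Ppoly (xs : List Int) : Polynomial ℤ :=
  (xs.map (fun x => 1 + Polynomial.X ^ x.toNat)).prod

theorem Ppoly_nil : Ppoly [] = 1 := by simp [Ppoly]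

theorem Ppoly_append_singleton (xs : List Int) (x : Int) :
    Ppoly (xs ++ [x]) = Ppoly xs * (1 + Polynomial.X ^ x.toNat) := by
  simp [Ppoly]

-- sums: a list indexed 0..len-1 summed via range
theorem sum_eq_range_getD (l : List Int) :
    l.sum = ((List.range l.length).map (fun j => l.getD j 0)).sum := by
  induction l with
  | nil => simp
  | cons x t ih =>
    rw [List.length_cons, List.range_succ_eq_map, List.map_cons, List.sum_cons,
      List.map_map, List.sum_cons]
    have : (List.range t.length).map ((fun j => (x :: t).getD j 0) ∘ Nat.succ) =
        (List.range t.length).map (fun j => t.getD j 0) := by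
      apply List.map_congr_left
      intro j _
      rfl
    rw [this, ← ih]
    simp

-- list-range sums equal Finset.range sums
theorem list_range_sum (f : Nat → Int) : ∀ (n : Nat),
    ((List.range n).map f).sum = ∑ j ∈ Finset.range n, f j := by
  intro n
  induction n with
  | zero => simp
  | succ n ih => rw [List.range_succ, List.map_append, List.sum_append,
      Finset.sum_range_succ, ih]; simp

-- congruence of sums mod M
theorem modeq_sum {α : Type} (M : Int) (l : List α) (f g : α → Int)
    (h : ∀ x ∈ l, Int.ModEq M (f x) (g x)) :
    Int.ModEq M ((l.map f).sum) ((l.map g).sum) := by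
  induction l with
  | nil => rfl
  | cons x t ih =>
    simp only [List.map_cons, List.sum_cons]
    exact (h x List.mem_cons_self).add (ih (fun y hy => h y (List.mem_cons_of_mem _ hy)))

theorem pymod_modeq (a : Int) : Int.ModEq 1000000007 (PySem.Int.mod a 1000000007) a := by
  rw [PySem.Int.mod_eq_emod_of_pos (by norm_num)]
  exact Int.emod_emod_of_dvd a dvd_rfl

-- ---- B-side: what a truncated coefficient list represents ----

def pvRep (k : Int) (p : List Int) (Q : Polynomial ℤ) : Prop :=
  1 ≤ p.length ∧ (p.length : Int) ≤ k ∧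
  (∀ i : Nat, i < p.length → Int.ModEq 1000000007 (p.getD i 0) (Q.coeff i)) ∧
  (∀ i : Nat, p.length ≤ i → (i : Int) < k → Q.coeff i = 0)

theorem leafRep (k x : Int) (hk : 1 ≤ k) (hx : 0 ≤ x) :
    pvRep k (if 0 < x ∧ x < k then 1 :: (List.replicate (x - 1).toNat 0 ++ [1])
      else if x = 0 then [2] else [1]) (1 + Polynomial.X ^ x.toNat) := by
  have hco : ∀ i : Nat, (1 + Polynomial.X ^ x.toNat : Polynomial ℤ).coeff i =
      (if i = 0 then 1 else 0) + (if i = x.toNat then 1 else 0) := by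
    intro i
    rw [Polynomial.coeff_add, Polynomial.coeff_one, Polynomial.coeff_X_pow]
  split_ifs with h1 h2
  · -- 0 < x < k : [1] + [0]*(x-1) + [1]
    obtain ⟨hx0, hxk⟩ := h1
    set m := (x - 1).toNat with hm
    have hxm : x.toNat = m + 1 := by omega
    have hlen : (1 :: (List.replicate m (0 : Int) ++ [1])).length = m + 2 := by
      simp
    refine ⟨by rw [hlen]; omega, by rw [hlen]; omega, ?_, ?_⟩
    · intro i hi
      rw [hlen] at hi
      rw [hco i, hxm]
      match i with
      | 0 => simp
      | j + 1 =>
        rw [List.getD_cons_succ]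
        by_cases hjm : j < m
        · rw [List.getD_append _ _ _ _ (by simpa using hjm), List.getD_replicate _ hjm,
            if_neg (by omega), if_neg (by omega)]
          simp
        · have hje : j = m := by omega
          subst hje
          have hg : (List.replicate m (0 : Int) ++ [1]).getD m 0 = 1 := by simp
          rw [hg, if_neg (by omega), if_pos (by omega)]
          simp
    · intro i hi _
      rw [hlen] at hi
      rw [hco i, if_neg (by omega), if_neg (by omega)]
      norm_num
  · -- x = 0 : [2]
    subst h2
    refine ⟨by simp, by simp; omega, ?_, ?_⟩
    · intro i hi
      simp only [List.length_singleton] at hi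
      have : i = 0 := by omega
      subst this
      rw [hco 0]
      simp
    · intro i hi _
      simp only [List.length_singleton] at hi
      rw [hco i, if_neg (by omega), if_neg (by omega)]
      norm_num
  · -- x ≥ k : [1]
    have hxk : k ≤ x := by
      by_contra hcon
      exact h1 ⟨by omega, by omega⟩
    refine ⟨by simp, by simp; omega, ?_, ?_⟩
    · intro i hi
      simp only [List.length_singleton] at hi
      have : i = 0 := by omega
      subst this
      rw [hco 0, if_pos rfl, if_neg (by omega)]
      simp
    · intro i hi hik
      simp only [List.length_singleton] at hi
      rw [hco i, if_neg (by omega), if_neg (by omega)]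
      norm_num

theorem mulRep (k : Int) (hk : 1 ≤ k) (a b : List Int) (P Q : Polynomial ℤ)
    (ha : pvRep k a P) (hb : pvRep k b Q) : pvRep k (pvMul k a b) (P * Q) := by
  obtain ⟨ha1, hak, hac, hah⟩ := ha
  obtain ⟨hb1, hbk, hbc, hbh⟩ := hb
  set la : Int := (a.length : Int) with hla
  set lb : Int := (b.length : Int) with hlb
  set n : Int := min k (la + lb - 1) with hn
  have hn1 : 1 ≤ n := by omega
  have hlen : (pvMul k a b).length = n.toNat := by
    rw [pvMul, List.length_map, PySem.List.length_pyRange_one]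
    omega
  have hget : ∀ T : Nat, T < n.toNat → (pvMul k a b).getD T 0 =
      PySem.Int.mod
        (((PySem.List.pyRange (max 0 ((T : Int) - lb + 1)) (min la ((T : Int) + 1)) 1).map
          (fun i => PySem.List.pyGetD a i 0 * PySem.List.pyGetD b ((T : Int) - i) 0)).sum)
        1000000007 := by
    intro T hT
    rw [List.getD_eq_getElem _ _ (by rw [hlen]; exact hT)]
    simp only [pvMul]
    rw [List.getElem_map, PySem.List.getElem_pyRange_one]
    norm_num
    rfl
  refine ⟨by omega, by omega, ?_, ?_⟩
  · -- coefficients below the truncation agree mod M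
    intro T hT
    rw [hlen] at hT
    rw [hget T hT]
    have hTk : (T : Int) < k := by omega
    have hTn : (T : Int) < la + lb - 1 := by omega
    set lo : Int := max 0 ((T : Int) - lb + 1) with hlo
    set hi : Int := min la ((T : Int) + 1) with hhi
    have hlohi : 0 ≤ lo ∧ lo ≤ hi ∧ hi ≤ (T : Int) + 1 := by omega
    refine (pymod_modeq _).trans ?_
    -- step A: replace stored values by true coefficients, mod M
    have hstepA : Int.ModEq 1000000007
        (((PySem.List.pyRange lo hi 1).map
          (fun i => PySem.List.pyGetD a i 0 * PySem.List.pyGetD b ((T : Int) - i) 0)).sum)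
        (((PySem.List.pyRange lo hi 1).map
          (fun i => P.coeff i.toNat * Q.coeff ((T : Int) - i).toNat)).sum) := by
      apply modeq_sum
      intro i hiMem
      rw [PySem.List.mem_pyRange_one] at hiMem
      have hia : 0 ≤ i ∧ i < la := by omega
      have hib : 0 ≤ (T : Int) - i ∧ (T : Int) - i < lb := by omega
      have hga : PySem.List.pyGetD a i 0 = a.getD i.toNat 0 := by
        rw [PySem.List.pyGetD_eq_getElem a 0 hia.1 hia.2,
          List.getD_eq_getElem a 0 (by omega)]
      have hgb : PySem.List.pyGetD b ((T : Int) - i) 0 = b.getD ((T : Int) - i).toNat 0 := by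
        rw [PySem.List.pyGetD_eq_getElem b 0 hib.1 hib.2,
          List.getD_eq_getElem b 0 (by omega)]
      rw [hga, hgb]
      exact (hac i.toNat (by omega)).mul (hbc ((T : Int) - i).toNat (by omega))
    refine hstepA.trans ?_
    -- step B: the window sum is the full convolution sum (outside terms vanish)
    have hsplit : PySem.List.pyRange 0 ((T : Int) + 1) 1 =
        (PySem.List.pyRange 0 lo 1 ++ PySem.List.pyRange lo hi 1) ++
          PySem.List.pyRange hi ((T : Int) + 1) 1 := by
      rw [← PySem.List.pyRange_one_append 0 lo hi (by omega) (by omega),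
        ← PySem.List.pyRange_one_append 0 hi ((T : Int) + 1) (by omega) (by omega)]
    have hzlo : ((PySem.List.pyRange 0 lo 1).map
        (fun i => P.coeff i.toNat * Q.coeff ((T : Int) - i).toNat)).sum = 0 := by
      apply List.sum_eq_zero
      intro y hy
      obtain ⟨i, hiMem, rfl⟩ := List.mem_map.mp hy
      rw [PySem.List.mem_pyRange_one] at hiMem
      have hq : Q.coeff ((T : Int) - i).toNat = 0 := by
        apply hbh
        · omega
        · omega
      rw [hq, mul_zero]
    have hzhi : ((PySem.List.pyRange hi ((T : Int) + 1) 1).map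
        (fun i => P.coeff i.toNat * Q.coeff ((T : Int) - i).toNat)).sum = 0 := by
      apply List.sum_eq_zero
      intro y hy
      obtain ⟨i, hiMem, rfl⟩ := List.mem_map.mp hy
      rw [PySem.List.mem_pyRange_one] at hiMem
      have hp : P.coeff i.toNat = 0 := by
        apply hah
        · omega
        · omega
      rw [hp, zero_mul]
    have hfull : ((PySem.List.pyRange lo hi 1).map
        (fun i => P.coeff i.toNat * Q.coeff ((T : Int) - i).toNat)).sum =
        ((PySem.List.pyRange 0 ((T : Int) + 1) 1).map
          (fun i => P.coeff i.toNat * Q.coeff ((T : Int) - i).toNat)).sum := by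
      rw [hsplit, List.map_append, List.map_append, List.sum_append, List.sum_append,
        hzlo, hzhi]
      ring
    rw [hfull]
    -- step C: the full sum is the product's coefficient
    have hcast : (T : Int) + 1 = ((T + 1 : Nat) : Int) := by push_cast; ring
    have hrange : PySem.List.pyRange 0 ((T : Int) + 1) 1 =
        (List.range (T + 1)).map (fun j => ((j : Nat) : Int)) := by
      rw [hcast, PySem.List.pyRange_zero_natCast]
    have hcongr : ((PySem.List.pyRange 0 ((T : Int) + 1) 1).map
        (fun i => P.coeff i.toNat * Q.coeff ((T : Int) - i).toNat)).sum =
        ((List.range (T + 1)).map (fun j => P.coeff j * Q.coeff (T - j))).sum := by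
      rw [hrange, List.map_map]
      apply congrArg
      apply List.map_congr_left
      intro j hj
      rw [List.mem_range] at hj
      have h1 : ((j : Int)).toNat = j := by omega
      have h2 : ((T : Int) - (j : Int)).toNat = T - j := by omega
      simp only [Function.comp_apply, h1, h2]
    rw [hcongr, list_range_sum, Polynomial.coeff_mul,
      Finset.Nat.sum_antidiagonal_eq_sum_range_succ_mk]
  · -- coefficients between the truncation length and k vanish in the product
    intro i hi hik
    rw [hlen] at hi
    have hilb : la + lb - 1 ≤ (i : Int) := by omega
    rw [Polynomial.coeff_mul]
    apply Finset.sum_eq_zero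
    intro pq hpq
    rw [Finset.mem_antidiagonal] at hpq
    by_cases hp : (pq.1 : Int) < la
    · have hq : Q.coeff pq.2 = 0 := by
        apply hbh
        · omega
        · omega
      rw [hq, mul_zero]
    · have hp0 : P.coeff pq.1 = 0 := by
        apply hah
        · omega
        · omega
      rw [hp0, zero_mul]

-- pair_up on the polynomial side
noncomputable def pairProd : List (Polynomial ℤ) → List (Polynomial ℤ)
  | a :: b :: r => (a * b) :: pairProd r
  | l => l

theorem pairProd_prod : ∀ (l : List (Polynomial ℤ)), (pairProd l).prod = l.prod := by
  intro l
  match l with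
  | [] => rfl
  | [a] => rfl
  | a :: b :: r =>
    simp only [pairProd, List.prod_cons]
    rw [pairProd_prod r, mul_assoc]

theorem pairUpRep (k : Int) (hk : 1 ≤ k) : ∀ (ps : List (List Int)) (Qs : List (Polynomial ℤ)),
    List.Forall₂ (pvRep k) ps Qs → List.Forall₂ (pvRep k) (pvPairUp k ps) (pairProd Qs) := by
  intro ps
  match ps with
  | [] => intro Qs h; cases h; exact List.Forall₂.nil
  | [a] =>
    intro Qs h
    cases h with
    | cons h1 h2 => cases h2; exact List.Forall₂.cons h1 List.Forall₂.nil
  | a :: b :: r =>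
    intro Qs h
    cases h with
    | cons h1 h2 =>
      cases h2 with
      | cons h3 h4 =>
        exact List.Forall₂.cons (mulRep k hk a b _ _ h1 h3) (pairUpRep k hk r _ h4)

theorem pvPairUp_ne_nil (k : Int) (ps : List (List Int)) (h : ps ≠ []) :
    pvPairUp k ps ≠ [] := by
  match ps with
  | [] => exact absurd rfl h
  | [a] => simp [pvPairUp]
  | a :: b :: r => simp [pvPairUp]

theorem tourRepAux (k : Int) (hk : 1 ≤ k) : ∀ (n : Nat) (ps : List (List Int))
    (Qs : List (Polynomial ℤ)), ps.length ≤ n → ps ≠ [] → List.Forall₂ (pvRep k) ps Qs →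
    ∃ p, pvTour k ps = [p] ∧ pvRep k p Qs.prod := by
  intro n
  induction n with
  | zero =>
    intro ps Qs hl hne _
    cases ps with
    | nil => exact absurd rfl hne
    | cons a t => simp at hl
  | succ n ihn =>
    intro ps Qs hl hne hf
    rw [pvTour]
    by_cases h2 : 1 < ps.length
    · rw [dif_pos h2]
      have hlp := pvPairUp_len k ps.length ps le_rfl
      obtain ⟨p, hp, hr⟩ := ihn (pvPairUp k ps) (pairProd Qs) (by omega)
        (pvPairUp_ne_nil k ps hne) (pairUpRep k hk ps Qs hf)
      exact ⟨p, hp, by rwa [pairProd_prod] at hr⟩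
    · rw [dif_neg h2]
      match ps, Qs, hf with
      | [a], [Q], List.Forall₂.cons h1 List.Forall₂.nil =>
        exact ⟨a, rfl, by simpa using h1⟩
      | a :: b :: r, _, _ => simp at h2

theorem tourRep (k : Int) (hk : 1 ≤ k) : ∀ (ps : List (List Int)) (Qs : List (Polynomial ℤ)),
    ps ≠ [] → List.Forall₂ (pvRep k) ps Qs →
    ∃ p, pvTour k ps = [p] ∧ pvRep k p Qs.prod :=
  fun ps Qs => tourRepAux k hk ps.length ps Qs le_rfl

-- ---- A-side: the DP rows carry the coefficients mod M ----

def Arel (k : Int) (row : List Int) (Q : Polynomial ℤ) : Prop :=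
  row.length = k.toNat ∧
  ∀ j : Nat, j < k.toNat → Int.ModEq 1000000007 (row.getD j 0) (Q.coeff j)

theorem Arel_step (k x : Int) (prev row' : List Int) (Q : Polynomial ℤ)
    (hk : 1 ≤ k) (hx : 0 ≤ x) (h : Arel k prev Q)
    (hlen : row'.length = k.toNat)
    (hrow : ∀ j : Nat, j < k.toNat → row'.getD j 0 = tgtRow prev x j) :
    Arel k row' (Q * (1 + Polynomial.X ^ x.toNat)) := by
  obtain ⟨hplen, hent⟩ := h
  refine ⟨hlen, ?_⟩
  intro j hj
  have hco : (Q * (1 + Polynomial.X ^ x.toNat)).coeff j =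
      Q.coeff j + (if x.toNat ≤ j then Q.coeff (j - x.toNat) else 0) := by
    rw [mul_add, mul_one, Polynomial.coeff_add, Polynomial.coeff_mul_X_pow']
  rw [hrow j hj, hco]
  unfold tgtRow
  by_cases hxj : x ≤ (j : Int)
  · rw [if_pos hxj, if_pos (by omega)]
    have h1 : ((j : Int) - x).toNat = j - x.toNat := by omega
    have h2 : j - x.toNat < k.toNat := by omega
    calc PySem.Int.mod (PySem.Int.mod (0 + prev.getD j 0) 1000000007 +
          prev.getD ((j : Int) - x).toNat 0) 1000000007
        ≡ PySem.Int.mod (0 + prev.getD j 0) 1000000007 +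
          prev.getD ((j : Int) - x).toNat 0 [ZMOD 1000000007] := pymod_modeq _
      _ ≡ (0 + prev.getD j 0) + prev.getD ((j : Int) - x).toNat 0 [ZMOD 1000000007] :=
          (pymod_modeq _).add_right _
      _ ≡ Q.coeff j + Q.coeff (j - x.toNat) [ZMOD 1000000007] := by
          rw [zero_add, h1]
          exact (hent j hj).add (hent _ h2)
  · rw [if_neg hxj, if_neg (by omega), add_zero]
    calc PySem.Int.mod (0 + prev.getD j 0) 1000000007
        ≡ 0 + prev.getD j 0 [ZMOD 1000000007] := pymod_modeq _
      _ ≡ Q.coeff j [ZMOD 1000000007] := by rw [zero_add]; exact hent j hj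

def dpInit (nums : List Int) (k : Int) : List (List Int) :=
  pvSet2 ((PySem.List.pyRange 0 ((nums.length : Int) + 1) 1).map
    (fun _ => List.replicate k.toNat 0)) 0 0 1

def outFold (nums : List Int) (k : Int) (m : Int) : List (List Int) :=
  (PySem.List.pyRange 0 m 1).foldl (pvOuterBody (0 :: nums) k) (dpInit nums k)

-- A's outer loop: after m steps row m holds the coefficients of Ppoly (take m) mod M
theorem outerA (nums : List Int) (k : Int) (hk : 1 ≤ k) (hnn : ∀ x ∈ nums, 0 ≤ x) :
    ∀ (m : Nat), m ≤ nums.length →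
    ((outFold nums k (m : Int)).length = nums.length + 1 ∧
     (∀ i : Nat, m < i → i ≤ nums.length →
        PySem.List.pyGetD (outFold nums k (m : Int)) (i : Int) [] =
          List.replicate k.toNat 0) ∧
     Arel k (PySem.List.pyGetD (outFold nums k (m : Int)) (m : Int) [])
       (Ppoly (nums.take m))) := by
  have hd0len : ((PySem.List.pyRange 0 ((nums.length : Int) + 1) 1).map
      (fun _ => List.replicate k.toNat (0 : Int))).length = nums.length + 1 := by
    rw [List.length_map, PySem.List.length_pyRange_one]; omega
  have hd0rows : ∀ i : Int, 0 ≤ i → i ≤ (nums.length : Int) →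
      PySem.List.pyGetD ((PySem.List.pyRange 0 ((nums.length : Int) + 1) 1).map
        (fun _ => List.replicate k.toNat (0 : Int))) i [] =
        List.replicate k.toNat (0 : Int) :=
    fun i h0 h1 =>
      PySem.List.pyGetD_map_pyRange_of_nonneg _ _ _ _ h0 (by omega)
  have h00 : ((0 : Nat) : Int) = 0 := by norm_num
  have hInitLen : (dpInit nums k).length = nums.length + 1 := by
    unfold dpInit pvSet2
    rw [PySem.List.length_pySetD]; exact hd0len
  have hInitRows : ∀ i : Nat, 1 ≤ i → i ≤ nums.length →
      PySem.List.pyGetD (dpInit nums k) (i : Int) [] = List.replicate k.toNat 0 := by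
    intro i h1 h2
    unfold dpInit pvSet2
    rw [getD_pySetD_tbl _ 0 _ (i : Int) le_rfl (by rw [hd0len]; push_cast; omega) (by omega),
      if_neg (by omega)]
    exact hd0rows (i : Int) (by omega) (by omega)
  have hInitRow0 : PySem.List.pyGetD (dpInit nums k) 0 [] =
      PySem.List.pySetD (List.replicate k.toNat 0) 0 1 := by
    unfold dpInit pvSet2
    rw [getD_pySetD_tbl _ 0 _ 0 le_rfl (by rw [hd0len]; push_cast; omega) le_rfl,
      if_pos rfl, hd0rows 0 le_rfl (by omega)]
  intro m
  induction m with
  | zero =>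
    intro _
    have hzf : outFold nums k ((0 : Nat) : Int) = dpInit nums k := by
      unfold outFold
      rw [h00, PySem.List.pyRange_one_eq_nil le_rfl, List.foldl_nil]
    rw [hzf]
    refine ⟨hInitLen, fun i hi1 hi2 => hInitRows i (by omega) hi2, ?_⟩
    rw [h00, hInitRow0, List.take_zero, Ppoly_nil]
    refine ⟨by rw [PySem.List.length_pySetD, List.length_replicate], ?_⟩
    intro j hj
    rw [getD_pySetD_row0 _ 1 j (by rw [List.length_replicate]; omega),
      Polynomial.coeff_one]
    by_cases h : j = 0
    · rw [if_pos h, if_pos (by exact_mod_cast h)]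
    · rw [if_neg h, if_neg (by exact_mod_cast h), List.getD_replicate _ hj]
  | succ m ihm =>
    intro hm1
    have hm : m < nums.length := by omega
    obtain ⟨hL, hrep, hrel⟩ := ihm (by omega)
    have hcastm : ((m : Int) + 1) = (((m + 1 : Nat)) : Int) := by push_cast; ring
    have hstep : outFold nums k ((m + 1 : Nat) : Int) =
        pvOuterBody (0 :: nums) k (outFold nums k (m : Int)) (m : Int) := by
      unfold outFold
      rw [← hcastm, PySem.List.pyRange_one_succ_right (by omega : (0 : Int) ≤ (m : Int)),
        List.foldl_append, List.foldl_cons, List.foldl_nil]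
    have hxval : PySem.List.pyGetD (0 :: nums) ((m : Int) + 1) 0 = nums.getD m 0 := by
      rw [hcastm, PySem.List.pyGetD_natCast]
      rfl
    have hxnn : 0 ≤ nums.getD m 0 := by
      rw [List.getD_eq_getElem nums 0 hm]
      exact hnn _ (List.getElem_mem hm)
    have hcurrep : PySem.List.pyGetD (outFold nums k (m : Int)) ((m : Int) + 1) [] =
        List.replicate k.toNat 0 := by
      rw [hcastm]
      exact hrep (m + 1) (by omega) (by omega)
    obtain ⟨hrlen, hent⟩ := hrel
    obtain ⟨hL', hRows', hRlen', hRent'⟩ :=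
      innerA (0 :: nums) k m k.toNat 0 (outFold nums k (m : Int))
        (PySem.List.pyGetD (outFold nums k (m : Int)) (m : Int) [])
        (List.replicate k.toNat 0)
        (by omega) (by rw [hL]; omega) rfl hcurrep hrlen (List.length_replicate)
        (by rw [hxval]; exact hxnn)
        (fun j _ hj => List.getD_replicate _ hj)
    rw [h00] at hL' hRows' hRlen' hRent'
    have hOB : pvOuterBody (0 :: nums) k (outFold nums k (m : Int)) (m : Int) =
        (PySem.List.pyRange 0 k 1).foldl (pvInnerBody (0 :: nums) k (m : Int))
          (outFold nums k (m : Int)) := rfl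
    rw [hstep, hOB]
    refine ⟨by rw [hL', hL], ?_, ?_⟩
    · intro i hi1 hi2
      rw [hRows' i (by rw [hL]; omega) (by omega)]
      exact hrep i (by omega) hi2
    · have htake : nums.take (m + 1) = nums.take m ++ [nums[m]] := by
        rw [List.take_succ, List.getElem?_eq_getElem hm]
        rfl
      rw [htake, Ppoly_append_singleton, ← hcastm]
      have hxg : nums.getD m 0 = nums[m] := List.getD_eq_getElem nums 0 hm
      apply Arel_step k nums[m] _ _ _ hk (by rw [← hxg]; exact hxnn) ⟨hrlen, hent⟩ hRlen'
      intro j hj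
      rw [hRent' j hj, if_neg (Nat.not_lt_zero j), hxval, hxg]

-- ===== VERDICT (by name: the statement is the Claim_ definition above) =====
theorem countPartitions_spec : Claim_equal_countPartitions := by
  unfold Claim_equal_countPartitions
  intro nums k _ hpre
  unfold Spec_countPartitions
  by_cases hs : nums.sum < 2 * k
  · unfold countPartitions countPartitions_alt
    rw [if_pos hs, if_pos hs]
  · have hk : 1 ≤ k := by
      rcases hpre with h | ⟨h1, _⟩
      · exact absurd h hs
      · exact h1
    have hnn : ∀ x ∈ nums, 0 ≤ x := by
      rcases hpre with h | ⟨_, h2⟩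
      · exact absurd h hs
      · exact h2
    have hne : nums ≠ [] := by
      intro h
      rw [h] at hs
      simp at hs
      omega
    -- unfold both programs to their post-guard values
    have hA : countPartitions nums k =
        PySem.Int.mod (PySem.Int.mod ((2 : Int) ^ nums.length) 1000000007 -
          PySem.Int.mod ((PySem.Int.mod
            (PySem.List.pyGetD (outFold nums k (nums.length : Int)) (-1) []).sum
            1000000007) * 2) 1000000007) 1000000007 := by
      unfold countPartitions outFold dpInit
      rw [if_neg hs]
    have hB : countPartitions_alt nums k =
        PySem.Int.mod ((2 : Int) ^ nums.length -
          2 * PySem.Int.mod (PySem.List.pyGetD (pvTour k (nums.map (fun x =>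
            if 0 < x ∧ x < k then 1 :: (List.replicate (x - 1).toNat 0 ++ [1])
            else if x = 0 then [2] else [1]))) 0 []).sum 1000000007) 1000000007 := by
      unfold countPartitions_alt
      rw [if_neg hs]
    -- B's tournament result represents Ppoly nums
    have hforallAux : ∀ (l : List Int), (∀ x ∈ l, 0 ≤ x) →
        List.Forall₂ (pvRep k) (l.map (fun x =>
          if 0 < x ∧ x < k then 1 :: (List.replicate (x - 1).toNat 0 ++ [1])
          else if x = 0 then [2] else [1]))
          (l.map (fun x => 1 + Polynomial.X ^ x.toNat)) := by
      intro l hl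
      induction l with
      | nil => exact List.Forall₂.nil
      | cons y t iht =>
        exact List.Forall₂.cons (leafRep k y hk (hl y List.mem_cons_self))
          (iht (fun z hz => hl z (List.mem_cons_of_mem _ hz)))
    have hforall := hforallAux nums hnn
    obtain ⟨p, hpeq, hp1, hpk, hpc, hph⟩ :=
      tourRep k hk _ _ (by simpa using hne) hforall
    have hQprod : ((nums.map (fun x => 1 + Polynomial.X ^ x.toNat)).prod) = Ppoly nums := rfl
    rw [hQprod] at hpc hph
    -- A's final row
    obtain ⟨hL, _, hrlen, hent⟩ :
        (outFold nums k (nums.length : Int)).length = nums.length + 1 ∧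
        (∀ i : Nat, nums.length < i → i ≤ nums.length →
          PySem.List.pyGetD (outFold nums k (nums.length : Int)) (i : Int) [] =
            List.replicate k.toNat 0) ∧
        (PySem.List.pyGetD (outFold nums k (nums.length : Int))
          (nums.length : Int) []).length = k.toNat ∧
        (∀ j : Nat, j < k.toNat →
          Int.ModEq 1000000007
            ((PySem.List.pyGetD (outFold nums k (nums.length : Int))
              (nums.length : Int) []).getD j 0) ((Ppoly nums).coeff j)) := by
      obtain ⟨h1, h2, h3, h4⟩ := outerA nums k hk hnn nums.length le_rfl
      rw [List.take_length] at h4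
      exact ⟨h1, h2, h3, h4⟩
    have hnefold : outFold nums k (nums.length : Int) ≠ [] := by
      intro h
      rw [h] at hL
      simp at hL
    have hlast : PySem.List.pyGetD (outFold nums k (nums.length : Int)) (-1) [] =
        PySem.List.pyGetD (outFold nums k (nums.length : Int)) (nums.length : Int) [] := by
      rw [PySem.List.pyGetD_neg_one _ _ hnefold, List.getLast_eq_getElem,
        PySem.List.pyGetD_natCast, List.getD_eq_getElem _ _ (by rw [hL]; omega)]
      congr 1
      rw [hL]
      omega
    set row := PySem.List.pyGetD (outFold nums k (nums.length : Int))
      (nums.length : Int) [] with hrow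
    -- both sums are congruent to the sum of the first k coefficients of Ppoly nums
    have hSA : Int.ModEq 1000000007 row.sum
        (((List.range k.toNat).map (fun j => (Ppoly nums).coeff j)).sum) := by
      rw [sum_eq_range_getD row, hrlen]
      exact modeq_sum 1000000007 _ _ _ (fun j hj => hent j (List.mem_range.mp hj))
    have hSB : Int.ModEq 1000000007 p.sum
        (((List.range k.toNat).map (fun j => (Ppoly nums).coeff j)).sum) := by
      have hLK : p.length ≤ k.toNat := by omega
      have hsplitK : ((List.range k.toNat).map (fun j => (Ppoly nums).coeff j)).sum =
          ((List.range p.length).map (fun j => (Ppoly nums).coeff j)).sum := by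
        rw [show k.toNat = p.length + (k.toNat - p.length) by omega, List.range_add,
          List.map_append, List.sum_append, List.map_map]
        have hz : ((List.range (k.toNat - p.length)).map
            ((fun j => (Ppoly nums).coeff j) ∘ (fun i => p.length + i))).sum = 0 := by
          apply List.sum_eq_zero
          intro y hy
          obtain ⟨i, hiMem, rfl⟩ := List.mem_map.mp hy
          rw [List.mem_range] at hiMem
          exact hph (p.length + i) (by omega) (by omega)
        rw [hz, add_zero]
      rw [hsplitK, sum_eq_range_getD p]
      exact modeq_sum 1000000007 _ _ _ (fun j hj => hpc j (List.mem_range.mp hj))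
    -- finish: both returned values are the same residue
    rw [hA, hB, hlast, hpeq, PySem.List.pyGetD_zero_cons]
    have h7 : (0 : Int) < 1000000007 := by norm_num
    simp only [PySem.Int.mod_eq_emod_of_pos h7]
    have hfin : Int.ModEq 1000000007
        ((2 : Int) ^ nums.length % 1000000007 - row.sum % 1000000007 * 2 % 1000000007)
        ((2 : Int) ^ nums.length - 2 * (p.sum % 1000000007)) := by
      have hm : ∀ a : Int, Int.ModEq 1000000007 (a % 1000000007) a :=
        fun a => Int.emod_emod_of_dvd a dvd_rfl
      apply Int.ModEq.sub (hm _)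
      calc row.sum % 1000000007 * 2 % 1000000007
          ≡ row.sum % 1000000007 * 2 [ZMOD 1000000007] := hm _
        _ ≡ row.sum * 2 [ZMOD 1000000007] := (hm _).mul_right 2
        _ ≡ (((List.range k.toNat).map (fun j => (Ppoly nums).coeff j)).sum) * 2
            [ZMOD 1000000007] := hSA.mul_right 2
        _ ≡ p.sum * 2 [ZMOD 1000000007] := (hSB.symm).mul_right 2
        _ = 2 * p.sum := by ring
        _ ≡ 2 * (p.sum % 1000000007) [ZMOD 1000000007] := ((hm _).symm).mul_left 2
    exact hfin
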